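-- pv_equiv track=rewrite | github.com/eaczechova/cs-sprint-challenge-hash-tables | hashtables/ex4/ex4.py | has_negatives
-- ===== SOURCE A (Python) =====
-- def has_negatives(a):
--     """
--     YOUR CODE HERE
--     """
--     # Your code here
--     cache = {}
--     result = []
--     for number in a:
--         if number > 0 and number not in cache:
--             cache[number] = 0
--
--     for neg_num in a:
--         if neg_num < 0 and (neg_num * -1) in cache:
--             cache[neg_num * -1] += 1
--
--     for (key, value) in cache.items():
--         if value >= 1:
--             result.append(key)
--     return result
-- ===== SOURCE B (Python) =====
-- def has_negatives(a):
--     present = set(a)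
--     seen = set()
--     result = []
--     for n in a:
--         if n > 0 and -n in present and n not in seen:
--             result.append(n)
--             seen.add(n)
--     return result
-- ===== Notes on version B (the rewrite author's own statement) =====
-- stated objective: simpler
-- what changed: Replaces the positive-count dict and three passes (collect positives, count negatives, scan items) with one membership set built once and a single ordered filter-dedup pass over the list.
import Mathlib
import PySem

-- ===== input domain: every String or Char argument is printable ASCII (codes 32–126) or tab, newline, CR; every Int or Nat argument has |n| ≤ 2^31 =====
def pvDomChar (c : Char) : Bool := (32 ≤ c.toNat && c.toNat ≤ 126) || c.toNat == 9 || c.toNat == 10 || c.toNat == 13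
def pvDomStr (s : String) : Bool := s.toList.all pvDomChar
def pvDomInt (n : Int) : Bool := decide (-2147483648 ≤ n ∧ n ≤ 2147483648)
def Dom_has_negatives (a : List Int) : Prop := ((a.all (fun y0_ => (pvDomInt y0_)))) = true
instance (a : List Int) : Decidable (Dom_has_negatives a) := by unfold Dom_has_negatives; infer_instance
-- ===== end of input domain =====

-- B replaces A's positive-count dict and three passes by one membership set plus a single ordered filter-dedup pass (objective: simpler).

-- ===== PORT A =====
def has_negatives (a : List Int) : List Int :=
  let cache : PySem.Dict Int Int :=
    a.foldl (fun c number =>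
      if decide (number > 0) && !(c.contains number) then c.insert number 0 else c)
      PySem.Dict.empty
  let cache2 : PySem.Dict Int Int :=
    a.foldl (fun c neg_num =>
      if decide (neg_num < 0) && c.contains (neg_num * -1)
      then c.modify (neg_num * -1) 0 (fun v => v + 1) else c)
      cache
  cache2.items.foldl (fun result kv => if decide (kv.2 ≥ 1) then result ++ [kv.1] else result) []

-- ===== PORT B =====
def has_negatives_alt (a : List Int) : List Int :=
  let present : PySem.Set Int := PySem.Set.ofList a
  (a.foldl (fun (st : List Int × PySem.Set Int) n =>
      if decide (n > 0) && present.contains (-n) && !(st.2.contains n)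
      then (st.1 ++ [n], st.2.add n) else st)
    ([], PySem.Set.empty)).1

-- ===== PRECONDITION & SPEC =====
def Spec_has_negatives (a : List Int) (out : List Int) : Prop := out = has_negatives_alt a
instance (a : List Int) (out : List Int) : Decidable (Spec_has_negatives a out) := by unfold Spec_has_negatives; infer_instance

-- ===== CLAIM (what is proved, stated in full; the proofs are below) =====
def Claim_equal_has_negatives : Prop := ∀ (a : List Int), Dom_has_negatives a → Spec_has_negatives a (has_negatives a)

-- ===== LEMMAS AND PROOFS =====

-- `if b && c then X else Y` split into nested ifs
theorem pv_and_if_split {α : Type} (b c : Bool) (X Y : α) :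
    (if b && c then X else Y) = if b then (if c then X else Y) else Y := by
  cases b <;> simp

-- filtering commutes through a Set.add fold (hence through PySem.Set.ofList / dedup)
theorem pv_set_foldl_filter (q : Int → Bool) (l : List Int) (s : List Int) :
    (l.foldl PySem.Set.add s).filter q = (l.filter q).foldl PySem.Set.add (s.filter q) := by
  induction l generalizing s with
  | nil => simp
  | cons x t ih =>
    have key : (PySem.Set.add s x).filter q
        = if q x then PySem.Set.add (s.filter q) x else s.filter q := by
      by_cases hm : x ∈ s <;> by_cases hq : q x <;>
        simp [PySem.Set.add, PySem.Set.contains, hm, hq, List.mem_filter]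
    rw [List.foldl_cons, ih, key, List.filter_cons]
    by_cases hq : q x = true
    · rw [if_pos hq, if_pos hq, List.foldl_cons]
    · rw [if_neg hq, if_neg hq]

-- B's paired fold with equal components stays paired
theorem pv_alt_pair (p : Int → Bool) (l : List Int) (r : List Int) :
    l.foldl (fun (st : List Int × PySem.Set Int) n =>
        if p n && !(st.2.contains n) then (st.1 ++ [n], st.2.add n) else st) (r, r)
      = (l.foldl (fun r n => if p n then PySem.Set.add r n else r) r,
         l.foldl (fun r n => if p n then PySem.Set.add r n else r) r) := by
  induction l generalizing r with
  | nil => rfl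
  | cons x t ih =>
    simp only [List.foldl_cons]
    by_cases hp : p x = true
    · by_cases hc : x ∈ r
      · rw [if_neg (by simp [hp, hc]), if_pos hp]
        have hadd : PySem.Set.add (r : PySem.Set Int) x = r := by
          simp [PySem.Set.add, hc]
        rw [hadd]
        exact ih r
      · rw [if_pos (by simp [hp, hc]), if_pos hp]
        have hadd : PySem.Set.add (r : PySem.Set Int) x = r ++ [x] := by
          simp [PySem.Set.add, hc]
        rw [hadd]
        exact ih (r ++ [x])
    · rw [if_neg (by simp [hp]), if_neg hp]
      exact ih r

-- A's first loop builds exactly the dict whose keys are the Set.add-fold, all values 0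
theorem pv_dict_build (l s : List Int) :
    (l.foldl (fun d n => if !(d.contains n) then d.insert n 0 else d)
      (PySem.Dict.mk (s.map (fun k => (k, (0 : Int))))))
    = PySem.Dict.mk ((l.foldl PySem.Set.add s).map (fun k => (k, (0 : Int)))) := by
  induction l generalizing s with
  | nil => rfl
  | cons x t ih =>
    have hc : (PySem.Dict.mk (s.map (fun k => (k, (0 : Int))))).contains x
        = decide (x ∈ s) := by
      by_cases hm : x ∈ s
      · simp [PySem.Dict.contains_mk, List.any_map, Function.comp, hm]
      · simp [PySem.Dict.contains_mk, List.any_map, Function.comp, hm]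
        exact fun y hy h => hm (h ▸ hy)
    by_cases hm : x ∈ s
    · simpa [hc, hm, PySem.Set.add, PySem.Set.contains] using ih s
    · have hins : (PySem.Dict.mk (s.map (fun k => (k, (0 : Int))))).insert x 0
          = PySem.Dict.mk ((s ++ [x]).map (fun k => (k, (0 : Int)))) := by
        apply PySem.Dict.ext
        rw [PySem.Dict.items_insert_of_not_contains _ _ (by simp [hc, hm])]
        simp
      simpa [hc, hm, PySem.Set.add, PySem.Set.contains, hins] using ih (s ++ [x])

-- every value of the freshly built dict is 0
theorem pv_getD_zero_dict (s : List Int) (k : Int) :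
    (PySem.Dict.mk (s.map (fun j => (j, (0 : Int))))).getD k 0 = 0 := by
  induction s with
  | nil => rfl
  | cons j t ih =>
    rw [PySem.Dict.getD_eq_get?_getD] at *
    simp only [List.map_cons, PySem.Dict.get?_mk_cons]
    split <;> simpa using ih

-- contains on the freshly built dict is list membership
theorem pv_contains_zero_dict (s : List Int) (k : Int) :
    (PySem.Dict.mk (s.map (fun j => (j, (0 : Int))))).contains k = decide (k ∈ s) := by
  by_cases hm : k ∈ s
  · simp [PySem.Dict.contains_mk, List.any_map, Function.comp, hm]
  · simp [PySem.Dict.contains_mk, List.any_map, Function.comp, hm]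
    exact fun y hy h => hm (h ▸ hy)

-- A's second loop: keys are invariant
theorem pv_loop2_keys (l : List Int) (d : PySem.Dict Int Int) :
    (l.foldl (fun c m =>
        if decide (m < 0) && c.contains (m * -1)
        then c.modify (m * -1) 0 (fun v => v + 1) else c) d).keys
    = d.keys := by
  induction l generalizing d with
  | nil => rfl
  | cons m t ih =>
    by_cases hcond : (decide (m < 0) && d.contains (m * -1)) = true
    · have hcont : d.contains (m * -1) = true := (Bool.and_eq_true_iff.mp hcond).2
      rw [List.foldl_cons, if_pos hcond, ih, PySem.Dict.keys_modify,
        PySem.Dict.keys_insert_of_contains _ _ hcont]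
    · rw [List.foldl_cons, if_neg hcond, ih]

-- A's second loop: final value at k = initial value + (count of -k in the list, when k is a positive key)
theorem pv_loop2_getD (l : List Int) (d : PySem.Dict Int Int) (k : Int) :
    (l.foldl (fun c m =>
        if decide (m < 0) && c.contains (m * -1)
        then c.modify (m * -1) 0 (fun v => v + 1) else c) d).getD k 0
    = d.getD k 0 + (if 0 < k ∧ d.contains k = true then (l.count (-k) : Int) else 0) := by
  induction l generalizing d with
  | nil => simp
  | cons m t ih =>
    by_cases hcond : (decide (m < 0) && d.contains (m * -1)) = true
    · have hm : m < 0 := by simpa using (Bool.and_eq_true_iff.mp hcond).1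
      have hcont : d.contains (m * -1) = true := (Bool.and_eq_true_iff.mp hcond).2
      rw [List.foldl_cons, if_pos hcond, ih, PySem.Dict.getD_modify]
      by_cases hk : k = m * -1
      · have hkpos : 0 < k := by omega
        have hck : d.contains k = true := by rw [hk]; exact hcont
        have hcm : (d.modify (m * -1) 0 (fun v => v + 1)).contains k = true := by
          rw [PySem.Dict.contains_modify]
          simp [hk]
        rw [if_pos hk, if_pos ⟨hkpos, hcm⟩, if_pos ⟨hkpos, hck⟩]
        have hcnt : (m :: t).count (-k) = t.count (-k) + 1 := by
          rw [List.count_cons]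
          simp [show (m == -k) = true by simp; omega]
        rw [hcnt, hk]
        push_cast
        ring
      · have hmk : (m == -k) = false := by
          simp only [beq_eq_false_iff_ne, ne_eq]
          omega
        have hcm : (d.modify (m * -1) 0 (fun v => v + 1)).contains k = d.contains k := by
          rw [PySem.Dict.contains_modify]
          have hk2 : ¬ k = -m := by omega
          simp [hk2]
        rw [if_neg hk, hcm, List.count_cons, hmk]
        simp
    · rw [List.foldl_cons, if_neg hcond, ih]
      by_cases hk : 0 < k ∧ d.contains k = true
      · have hmk : (m == -k) = false := by
          simp only [beq_eq_false_iff_ne, ne_eq]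
          intro h
          apply hcond
          have hm0 : m < 0 := by omega
          have h1 : m * -1 = k := by omega
          rw [h1]
          simp [hm0, hk.2]
        rw [if_pos hk, if_pos hk, List.count_cons, hmk]
        simp
      · rw [if_neg hk, if_neg hk]

-- count ≥ 1 is membership (Int-cast form used below)
theorem pv_count_ge_one (l : List Int) (v : Int) :
    (decide ((1 : Int) ≤ (l.count v : Int))) = decide (v ∈ l) := by
  by_cases hm : v ∈ l
  · have h1 : 0 < l.count v := List.count_pos_iff.mpr hm
    have h2 : (1 : Int) ≤ (l.count v : Int) := by exact_mod_cast h1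
    simp [hm, h2]
  · rw [List.count_eq_zero.mpr hm]
    simp [hm]

theorem has_negatives_spec : Claim_equal_has_negatives := by
  intro a _
  unfold Spec_has_negatives has_negatives has_negatives_alt
  simp only [ge_iff_le]
  -- B side --------------------------------------------------------------
  have hB : (a.foldl (fun (st : List Int × PySem.Set Int) n =>
        if decide (n > 0) && (PySem.Set.ofList a).contains (-n) && !(st.2.contains n)
        then (st.1 ++ [n], st.2.add n) else st) ([], PySem.Set.empty)).1
      = (a.filter (fun n => decide (n > 0) && (PySem.Set.ofList a).contains (-n))).foldl
          PySem.Set.add [] := by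
    have h := pv_alt_pair (fun n => decide (n > 0) && (PySem.Set.ofList a).contains (-n)) a []
    rw [show (([], PySem.Set.empty) : List Int × PySem.Set Int)
        = (([] : List Int), ([] : List Int)) from rfl]
    rw [h]
    rw [← List.foldl_filter]
  -- A side: first loop --------------------------------------------------
  have hsplit : (fun (c : PySem.Dict Int Int) (number : Int) =>
        if decide (number > 0) && !(c.contains number) then c.insert number 0 else c)
      = fun c number => if decide (number > 0) then
          (if !(c.contains number) then c.insert number 0 else c) else c := by
    funext c number
    exact pv_and_if_split _ _ _ _
  have hA1 : a.foldl (fun (c : PySem.Dict Int Int) number =>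
        if decide (number > 0) && !(c.contains number) then c.insert number 0 else c)
        PySem.Dict.empty
      = PySem.Dict.mk
          (((a.filter (fun n => decide (n > 0))).foldl PySem.Set.add []).map
            (fun k => (k, (0 : Int)))) := by
    rw [hsplit, ← List.foldl_filter]
    have h := pv_dict_build (a.filter (fun n => decide (n > 0))) []
    simpa using h
  set pos : List Int := a.filter (fun n => decide (n > 0)) with hpos
  set S : List Int := pos.foldl PySem.Set.add [] with hS
  have hSof : S = PySem.Set.ofList pos := rfl
  have hSnodup : S.Nodup := by rw [hSof]; exact PySem.Set.nodup_ofList pos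
  have hSmem : ∀ x, x ∈ S ↔ x ∈ pos := by
    intro x; rw [hSof]; exact PySem.Set.mem_ofList pos x
  rw [hA1, hB]
  -- A side: second loop -------------------------------------------------
  set d1 : PySem.Dict Int Int := PySem.Dict.mk (S.map (fun k => (k, (0 : Int)))) with hd1
  set d2 : PySem.Dict Int Int := a.foldl (fun c neg_num =>
      if decide (neg_num < 0) && c.contains (neg_num * -1)
      then c.modify (neg_num * -1) 0 (fun v => v + 1) else c) d1 with hd2
  have hkeys1 : d1.keys = S := by
    rw [hd1]
    simp [PySem.Dict.keys, Function.comp_def]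
  have hkeys : d2.keys = S := by rw [hd2, pv_loop2_keys, hkeys1]
  have hnodup : d2.keys.Nodup := by rw [hkeys]; exact hSnodup
  have hitems : d2.items = d2.keys.map (fun k => (k, d2.getD k 0)) :=
    PySem.Dict.items_eq_map_keys d2 hnodup 0
  rw [hitems, hkeys]
  -- A side: output loop -------------------------------------------------
  have hAfin : (List.foldl (fun result kv =>
        if decide ((1 : Int) ≤ kv.2) then result ++ [kv.1] else result) []
        (S.map (fun k => (k, d2.getD k 0))))
      = S.filter (fun k => decide ((1 : Int) ≤ d2.getD k 0)) := by
    rw [PySem.List.foldl_append_if (fun kv : Int × Int => decide ((1 : Int) ≤ kv.2))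
        (fun kv : Int × Int => kv.1) (S.map (fun k => (k, d2.getD k 0))) []]
    rw [List.filter_map, List.map_map]
    simp [Function.comp_def]
  rw [hAfin]
  -- pointwise rewrite of the filter predicate on S
  have hpred : ∀ k ∈ S, (decide ((1 : Int) ≤ d2.getD k 0)) = decide ((-k) ∈ a) := by
    intro k hkS
    have hkpos : k ∈ pos := (hSmem k).mp hkS
    have hk0 : 0 < k := by
      have h := (List.mem_filter.mp hkpos).2
      simpa using h
    have hc1 : d1.contains k = true := by
      rw [hd1, pv_contains_zero_dict]
      simpa using hkS
    have hval : d2.getD k 0 = (a.count (-k) : Int) := by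
      rw [hd2, pv_loop2_getD, if_pos ⟨hk0, hc1⟩, hd1, pv_getD_zero_dict]
      ring
    rw [hval, pv_count_ge_one]
  -- B's filtered list equals A's
  have hBeq : (a.filter (fun n => decide (n > 0) && (PySem.Set.ofList a).contains (-n))).foldl
        PySem.Set.add []
      = S.filter (fun k => decide ((-k) ∈ a)) := by
    have hsplitB : a.filter (fun n => decide (n > 0) && (PySem.Set.ofList a).contains (-n))
        = pos.filter (fun n => (PySem.Set.ofList a).contains (-n)) := by
      rw [hpos, List.filter_filter]
      apply List.filter_congr
      intro x _
      exact Bool.and_comm _ _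
    rw [hsplitB]
    have hcont : ∀ n : Int, (PySem.Set.ofList a).contains (-n) = decide ((-n) ∈ a) := by
      intro n
      by_cases hm : (-n) ∈ a <;>
        simp [PySem.Set.contains, PySem.Set.mem_ofList, hm]
    have hfc : pos.filter (fun n => (PySem.Set.ofList a).contains (-n))
        = pos.filter (fun n => decide ((-n) ∈ a)) := by
      apply List.filter_congr
      intro x _
      exact hcont x
    rw [hfc]
    have h := pv_set_foldl_filter (fun k => decide ((-k) ∈ a)) pos []
    simp only [List.filter_nil] at h
    rw [← hS] at h
    exact h.symm
  rw [hBeq]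
  exact (List.filter_congr hpred)
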